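-- pv_equiv track=rewrite | github.com/miliar/Code_Jam_Webscraper | solutions_python/solutions_year17_round0_nr2/3472.py | inversion_idx
-- ===== SOURCE A (Python) =====
-- def inversion_idx(N):
--     num = str(N)
--     if len(num) == 1:
--         return None
--     for c in range(len(num)-1,0,-1):
--         if num[c]<num[c-1]:
--             return (c-1)
--     return None
-- ===== SOURCE B (Python) =====
-- def inversion_idx(N):
--     num = str(N)
--     idx = [i for i in range(len(num) - 1) if num[i] > num[i + 1]]
--     return max(idx) if idx else None
-- ===== Notes on version B (the rewrite author's own statement) =====
-- stated objective: simpler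
-- what changed: Replaces the early-return right-to-left index scan with building the full list of left-to-right drop positions by comprehension and reducing it with max (rightmost drop), dropping the special single-digit branch.
import Mathlib
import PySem

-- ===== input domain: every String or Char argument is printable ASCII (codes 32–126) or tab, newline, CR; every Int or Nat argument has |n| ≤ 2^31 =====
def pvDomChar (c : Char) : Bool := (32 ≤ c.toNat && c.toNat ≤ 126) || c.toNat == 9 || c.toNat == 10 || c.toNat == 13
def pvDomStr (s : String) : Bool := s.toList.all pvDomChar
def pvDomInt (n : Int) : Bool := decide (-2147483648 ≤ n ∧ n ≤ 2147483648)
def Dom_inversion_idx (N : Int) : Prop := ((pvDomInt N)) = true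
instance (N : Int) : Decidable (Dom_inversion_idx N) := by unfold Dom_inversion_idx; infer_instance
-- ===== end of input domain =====

-- B changes the decomposition only (build all drop positions, reduce by max), not the cost; equal on all inputs.

-- ===== PORT A =====
-- the for-loop with early return: first c in the descending range with num[c] < num[c-1]
def pvLoopA (num : List Char) : List Int → Option Int
  | [] => none
  | c :: rest =>
    match PySem.List.pyGet? num c, PySem.List.pyGet? num (c - 1) with
    | some a, some b => if a < b then some (c - 1) else pvLoopA num rest
    | _, _ => none   -- IndexError; unreachable for in-range c

def inversion_idx (N : Int) : Option Int :=
  let num := (PySem.Int.toStr N).toList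
  if num.length = 1 then none
  else pvLoopA num (PySem.List.pyRange ((num.length : Int) - 1) 0 (-1))

-- ===== PORT B =====
-- num[i] > num[i+1]
def pvDropB (num : List Char) (i : Int) : Bool :=
  match PySem.List.pyGet? num i, PySem.List.pyGet? num (i + 1) with
  | some a, some b => decide (b < a)
  | _, _ => false   -- IndexError; unreachable for in-range i

def inversion_idx_alt (N : Int) : Option Int :=
  let num := (PySem.Int.toStr N).toList
  let idx := (PySem.List.pyRange 0 ((num.length : Int) - 1) 1).filter (pvDropB num)
  PySem.List.max? idx (fun x => x)

-- ===== PRECONDITION & SPEC =====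
def Spec_inversion_idx (N : Int) (out : Option Int) : Prop := out = inversion_idx_alt N
instance (N : Int) (out : Option Int) : Decidable (Spec_inversion_idx N out) := by unfold Spec_inversion_idx; infer_instance

-- ===== CLAIM (what is proved, stated in full; the proofs are below) =====
def Claim_equal_inversion_idx : Prop := ∀ (N : Int), Dom_inversion_idx N → Spec_inversion_idx N (inversion_idx N)

-- ===== LEMMAS AND PROOFS =====

-- A's scan over an in-range index list is "first drop in that order", i.e. head? of the filtered list.
lemma pvLoopA_eq_head_filter (num : List Char) (l : List Int)
    (h : ∀ c ∈ l, 0 < c ∧ c < (num.length : Int)) :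
    pvLoopA num l = ((l.filter (fun c => pvDropB num (c - 1))).head?).map (· - 1) := by
  induction l with
  | nil => simp [pvLoopA]
  | cons c rest ih =>
    obtain ⟨h1, h2⟩ := h c (List.mem_cons_self ..)
    have hgc : PySem.List.pyGet? num c = some num[c.toNat] :=
      PySem.List.pyGet?_eq_some_getElem num (by omega) h2
    have hgc1 : PySem.List.pyGet? num (c - 1) = some num[(c - 1).toNat] :=
      PySem.List.pyGet?_eq_some_getElem num (by omega) (by omega)
    have hd : pvDropB num (c - 1) = decide (num[c.toNat] < num[(c - 1).toNat]) := by
      unfold pvDropB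
      rw [show c - 1 + 1 = c by ring, hgc, hgc1]
    rw [pvLoopA, hgc, hgc1]
    simp only [List.filter_cons, hd, decide_eq_true_eq]
    split_ifs with hlt
    · simp
    · exact ih (fun x hx => h x (List.mem_cons_of_mem _ hx))

-- max over id of a strictly increasing list is its last element.
lemma foldl_max_eq_getLast (t : List Int) (x : Int)
    (h : (x :: t).Pairwise (· < ·)) :
    t.foldl max x = (x :: t).getLast (by simp) := by
  induction t generalizing x with
  | nil => simp
  | cons y t ih =>
    have hxy : x < y := (List.pairwise_cons.1 h).1 y (List.mem_cons_self ..)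
    have h' : (y :: t).Pairwise (· < ·) := (List.pairwise_cons.1 h).2
    have : max x y = y := max_eq_right hxy.le
    simp only [List.foldl_cons, this]
    exact ih y h'

lemma max?_id_sorted (m : List Int) (h : m.Pairwise (· < ·)) :
    PySem.List.max? m (fun x => x) = m.getLast? := by
  cases m with
  | nil => simp [PySem.List.max?]
  | cons x t =>
    rw [PySem.List.max?_id_cons, foldl_max_eq_getLast t x h,
      List.getLast?_eq_some_getLast (by simp)]

-- the two index ranges are the same list up to the shift c ↦ c - 1
lemma range_shift (n : Int) :
    PySem.List.pyRange 0 (n - 1) 1 = (PySem.List.pyRange 1 n 1).map (· - 1) := by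
  rw [PySem.List.pyRange_one, PySem.List.pyRange_one, List.map_map]
  simp [Function.comp_def, add_comm]

lemma main_eq (num : List Char) :
    (if num.length = 1 then none
     else pvLoopA num (PySem.List.pyRange ((num.length : Int) - 1) 0 (-1)))
    = PySem.List.max?
        ((PySem.List.pyRange 0 ((num.length : Int) - 1) 1).filter (pvDropB num))
        (fun x => x) := by
  set n : Int := (num.length : Int) with hn
  -- B side
  rw [range_shift, List.filter_map,
    show ((pvDropB num ∘ (· - 1)) = fun c => pvDropB num (c - 1)) from rfl]
  set F := (PySem.List.pyRange 1 n 1).filter (fun c => pvDropB num (c - 1)) with hF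
  have hFsorted : (F.map (· - 1)).Pairwise (· < ·) := by
    have : F.Pairwise (· < ·) :=
      (PySem.List.pairwise_lt_pyRange_one 1 n).filter _
    exact List.pairwise_map.2 (this.imp (by omega))
  rw [max?_id_sorted _ hFsorted, List.getLast?_map]
  -- A side
  by_cases h1 : num.length = 1
  · have : F = [] := by
      rw [hF, show n = 1 by omega, PySem.List.pyRange_one_eq_nil le_rfl]
      rfl
    simp [h1, this]
  · rw [if_neg h1, PySem.List.pyRange_neg_one_eq_reverse]
    have h0 : (0 : Int) + 1 = 1 := by ring
    have h2 : n - 1 + 1 = n := by ring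
    rw [h0, h2]
    rw [pvLoopA_eq_head_filter num _ (by
      intro c hc
      rw [List.mem_reverse, PySem.List.mem_pyRange_one] at hc
      omega)]
    rw [List.filter_reverse, List.head?_reverse]

-- ===== VERDICT (by name: the statement is the Claim_ definition above) =====
theorem inversion_idx_spec : Claim_equal_inversion_idx := by
  intro N _
  show inversion_idx N = inversion_idx_alt N
  unfold inversion_idx inversion_idx_alt
  exact main_eq _
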